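-- pv_equiv track=rewrite | github.com/t4ccer/stats-of-war | game_of_war.py | play_a_first
-- ===== SOURCE A (Python) =====
-- WIN_A = 1
--
-- WIN_B = 2
--
-- END_A = 3
--
-- END_B = 4
--
-- END_OF_CARDS = 5
--
-- def play_a_first(hA, hB):
--     if not hA and not hB:
--         hA = []
--         hB = []
--         return END_OF_CARDS
--     if not hA:
--         return END_B
--     if not hB:
--         return END_A
--
--     a = hA.pop(0)
--     b = hB.pop(0)
--     if a > b:
--         hA.append(a)
--         hA.append(b)
--         return WIN_A
--     if a < b :
--         hB.append(a)
--         hB.append(b)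
--         return WIN_B
--     if a==b:
--         if not hA:
--             return END_B
--         if not hB:
--             return END_A
--
--         h1 = hA.pop(0)
--         h2 = hB.pop(0)
--         res = play_a_first(hA, hB)
--         if res == WIN_A:
--             hA.append(h1)
--             hA.append(h2)
--             hA.append(a)
--             hA.append(b)
--             pass
--         else:
--             hB.append(h1)
--             hB.append(h2)
--             hB.append(a)
--             hB.append(b)
--             pass
--         return res
-- ===== SOURCE B (Python) =====
-- # B walks the hands by index (step 2) and returns the round's result directly,
-- # without mutating the input lists (A mutates its arguments; the equivalence
-- # claimed here is about the return value only).
-- WIN_A = 1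
-- WIN_B = 2
-- END_A = 3
-- END_B = 4
-- END_OF_CARDS = 5
--
-- def play_a_first(hA, hB):
--     i = 0
--     while True:
--         if i >= len(hA):
--             return END_OF_CARDS if i >= len(hB) else END_B
--         if i >= len(hB):
--             return END_A
--         a, b = hA[i], hB[i]
--         if a > b:
--             return WIN_A
--         if a < b:
--             return WIN_B
--         if i + 1 >= len(hA):
--             return END_B
--         if i + 1 >= len(hB):
--             return END_A
--         i += 2
-- ===== Notes on version B (the rewrite author's own statement) =====
-- stated objective: faster
-- what changed: The tie recursion with pop(0)/append bookkeeping is replaced by a single non-mutating loop that walks both hands by index in steps of 2 and returns the outcome directly (equal return value; B does not mutate the argument lists as A does).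
import Mathlib
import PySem

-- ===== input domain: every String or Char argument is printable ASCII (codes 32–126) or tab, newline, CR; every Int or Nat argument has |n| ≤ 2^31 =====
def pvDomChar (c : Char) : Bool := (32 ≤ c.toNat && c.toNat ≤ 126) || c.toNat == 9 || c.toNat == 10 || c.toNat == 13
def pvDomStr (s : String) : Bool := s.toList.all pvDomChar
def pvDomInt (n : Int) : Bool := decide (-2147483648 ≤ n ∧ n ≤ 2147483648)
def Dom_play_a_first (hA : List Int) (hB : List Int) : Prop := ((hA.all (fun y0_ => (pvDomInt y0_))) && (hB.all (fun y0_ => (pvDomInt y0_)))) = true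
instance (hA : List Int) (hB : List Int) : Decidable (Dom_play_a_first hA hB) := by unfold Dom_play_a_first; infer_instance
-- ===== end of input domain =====

-- B replaces A's tie recursion (pop(0)/append bookkeeping on mutable hands) by a
-- non-mutating index walk in steps of 2; equal return value (A mutates its
-- argument lists, B does not: the equivalence proved is about the return value).

-- ===== PORT A =====
-- A mutates hA/hB in place; the port threads them as state (result, hA', hB')
-- and play_a_first projects the returned result, as the Python returns it.
def playAux : List Int → List Int → Int × List Int × List Int
  | [], [] => (5, [], [])
  | [], hB => (4, [], hB)
  | hA, [] => (3, hA, [])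
  | a :: tA, b :: tB =>
    if a > b then (1, tA ++ [a, b], tB)
    else if a < b then (2, tA, tB ++ [a, b])
    else
      match tA, tB with
      | [], tB' => (4, [], tB')
      | tA', [] => (3, tA', [])
      | h1 :: tA', h2 :: tB' =>
        let r := playAux tA' tB'
        if r.1 = 1 then (1, r.2.1 ++ [h1, h2, a, b], r.2.2)
        else (r.1, r.2.1, r.2.2 ++ [h1, h2, a, b])

def play_a_first (hA : List Int) (hB : List Int) : Int := (playAux hA hB).1

-- ===== PORT B =====
-- the while loop of Source B, index i stepping by 2
def altGo (hA hB : List Int) (i : Nat) : Int :=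
  if i ≥ hA.length then
    if i ≥ hB.length then 5 else 4
  else if i ≥ hB.length then 3
  else
    let a := hA.getD i 0
    let b := hB.getD i 0
    if a > b then 1
    else if a < b then 2
    else if i + 1 ≥ hA.length then 4
    else if i + 1 ≥ hB.length then 3
    else altGo hA hB (i + 2)
termination_by hA.length - i
decreasing_by omega

def play_a_first_alt (hA : List Int) (hB : List Int) : Int := altGo hA hB 0

-- ===== PRECONDITION & SPEC =====
def Spec_play_a_first (hA : List Int) (hB : List Int) (out : Int) : Prop := out = play_a_first_alt hA hB
instance (hA : List Int) (hB : List Int) (out : Int) : Decidable (Spec_play_a_first hA hB out) := by unfold Spec_play_a_first; infer_instance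

-- ===== CLAIM (what is proved, stated in full; the proofs are below) =====
def Claim_equal_play_a_first : Prop := ∀ (hA : List Int) (hB : List Int), Dom_play_a_first hA hB → Spec_play_a_first hA hB (play_a_first hA hB)


-- ===== LEMMAS AND PROOFS =====

-- walking shifted lists one index further is walking the tails
theorem altGo_shift (a b : Int) (x y : List Int) (i : Nat) :
    altGo (a :: x) (b :: y) (i + 1) = altGo x y i := by
  have key : ∀ n i, x.length - i ≤ n → altGo (a :: x) (b :: y) (i + 1) = altGo x y i := by
    intro n
    induction n with
    | zero =>
      intro i h
      have hx : x.length ≤ i := by omega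
      conv_rhs => rw [altGo]
      rw [altGo]
      simp only [List.length_cons, ge_iff_le, add_le_add_iff_right, hx, if_true]
    | succ n ih =>
      intro i h
      conv_rhs => rw [altGo]
      rw [altGo]
      simp only [List.length_cons, List.getD_cons_succ, ge_iff_le, add_le_add_iff_right]
      split_ifs <;> try rfl
      exact ih (i + 2) (by omega)
  exact key (x.length - i) i le_rfl

theorem aux_eq_alt : ∀ (hA hB : List Int), (playAux hA hB).1 = altGo hA hB 0 := by
  intro hA hB
  induction hA, hB using playAux.induct with
  | case1 => rw [playAux, altGo]; simp
  | case2 hB hne =>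
    cases hB with
    | nil => exact absurd rfl hne
    | cons b t =>
      rw [playAux, altGo]
      · simp
      · exact hne
  | case3 hA hne =>
    cases hA with
    | nil => exact absurd rfl hne
    | cons a t =>
      rw [playAux, altGo]
      · simp
      · exact hne
  | case4 a tA b tB hgt =>
    rw [playAux.eq_def, altGo]; simp [hgt]
  | case5 a tA b tB hgt hlt =>
    rw [playAux.eq_def, altGo]; simp [hgt, hlt]
  | case6 a b hgt hlt tB' =>
    rw [playAux.eq_def, altGo]; simp [hgt, hlt]
  | case7 a b hgt hlt tA' hne =>
    cases tA' with
    | nil => exact absurd rfl hne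
    | cons c t =>
      rw [playAux.eq_def, altGo]; simp [hgt, hlt]
  | case8 a b hgt hlt h1 tA' h2 tB' r hr ih =>
    have hr' : (playAux tA' tB').1 = 1 := hr
    have hs : altGo (a :: h1 :: tA') (b :: h2 :: tB') (0 + 2) = altGo tA' tB' 0 :=
      (altGo_shift a b (h1 :: tA') (h2 :: tB') 1).trans (altGo_shift h1 h2 tA' tB' 0)
    rw [playAux.eq_def, altGo]
    simp [hgt, hlt, hr', hs, ← ih]
  | case9 a b hgt hlt h1 tA' h2 tB' r hr ih =>
    have hr' : ¬ (playAux tA' tB').1 = 1 := hr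
    have hs : altGo (a :: h1 :: tA') (b :: h2 :: tB') (0 + 2) = altGo tA' tB' 0 :=
      (altGo_shift a b (h1 :: tA') (h2 :: tB') 1).trans (altGo_shift h1 h2 tA' tB' 0)
    rw [playAux.eq_def, altGo]
    simp [hgt, hlt, hr', hs, ← ih]

-- ===== VERDICT (by name: the statement is the Claim_ definition above) =====
theorem play_a_first_spec : Claim_equal_play_a_first := by
  intro hA hB _
  unfold Spec_play_a_first play_a_first play_a_first_alt
  exact aux_eq_alt hA hB
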